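-- pv_equiv track=rewrite | github.com/ReverendKane/datawoven | apps/desktop/src/discovery_assistant/admin_wizard.py | _normalize_field_key
-- ===== SOURCE A (Python) =====
-- def _normalize_field_key(field_name: str) -> str:
--     """
--     Convert field display names to consistent policy keys.
--
--     Examples:
--         "Full Name" -> "full_name"
--         "Role / Title" -> "role_title"
--         "Screenshots/Attachments" -> "screenshots_attachments"
--     """
--     # Replace common separators with underscores
--     normalized = field_name.lower()
--     normalized = normalized.replace(" / ", "_")
--     normalized = normalized.replace("/", "_")
--     normalized = normalized.replace(" ", "_")
--
--     # Remove any duplicate underscores that might have been created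
--     while "__" in normalized:
--         normalized = normalized.replace("__", "_")
--
--     # Remove leading/trailing underscores
--     normalized = normalized.strip("_")
--
--     return normalized
-- ===== SOURCE B (Python) =====
-- def _normalize_field_key(field_name: str) -> str:
--     # Single-pass tokenizer: split the lowered string on runs of separator
--     # characters (space, slash, underscore) and join the non-empty tokens.
--     tokens = []
--     current = []
--     for ch in field_name.lower():
--         if ch in " /_":
--             if current:
--                 tokens.append("".join(current))
--                 current = []
--         else:
--             current.append(ch)
--     if current:
--         tokens.append("".join(current))
--     return "_".join(tokens)
-- ===== Notes on version B (the rewrite author's own statement) =====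
-- stated objective: simpler
-- what changed: Replaced A's multi-pass pipeline (three sequential str.replace calls, a while-loop collapsing duplicate underscores, then a strip) with a single character-by-character tokenizer that splits the lowered string on runs of separator characters (space, slash, underscore) and joins the non-empty tokens with an underscore.
import Mathlib
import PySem

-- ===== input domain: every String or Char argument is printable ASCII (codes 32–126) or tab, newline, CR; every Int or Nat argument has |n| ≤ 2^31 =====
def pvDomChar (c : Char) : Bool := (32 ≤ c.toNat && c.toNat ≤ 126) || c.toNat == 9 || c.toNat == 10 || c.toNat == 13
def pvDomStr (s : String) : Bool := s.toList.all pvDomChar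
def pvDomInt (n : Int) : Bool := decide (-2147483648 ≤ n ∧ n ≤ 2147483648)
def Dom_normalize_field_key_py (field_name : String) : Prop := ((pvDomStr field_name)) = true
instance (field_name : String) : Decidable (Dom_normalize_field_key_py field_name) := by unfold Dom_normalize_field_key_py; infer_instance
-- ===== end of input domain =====

-- B replaces A's multi-pass replace/collapse/strip pipeline with a single-pass tokenizer
-- (split the lowered string on runs of separator characters — space, slash, underscore — and join the non-empty tokens with an underscore);
-- same return value on every input (simpler decomposition, no speed claim).

-- ===== PORT A =====
-- repC and the lemmas below exist only to justify termination of `collapseChars`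
-- (the port of A's `while "__" in normalized:` loop), which cites repU_len_lt by name.
def repC (old new : List Char) : List Char → List Char
  | [] => []
  | c :: t =>
    if old.isPrefixOf (c :: t) then new ++ repC old new (List.drop (old.length - 1) t)
    else c :: repC old new t
termination_by l => l.length
decreasing_by
  all_goals (simp; try omega)

theorem go_eq_repC (old new : List Char) (hold : old ≠ []) :
    ∀ fuel l acc, l.length ≤ fuel →
      PySem.Chars.replace.go old new fuel l acc = acc.reverse ++ repC old new l := by
  intro fuel
  induction fuel with
  | zero =>
    intro l acc h
    have : l = [] := by cases l <;> simp_all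
    subst this
    rw [PySem.Chars.replace.go.eq_def]
    simp [repC]
  | succ n ih =>
    intro l acc h
    cases l with
    | nil => rw [PySem.Chars.replace.go.eq_def]; simp [repC]
    | cons c t =>
      have e : PySem.Chars.replace.go old new (n+1) (c :: t) acc =
          if old.isPrefixOf (c :: t) = true then
            PySem.Chars.replace.go old new n (List.drop old.length (c :: t)) (new.reverse ++ acc)
          else PySem.Chars.replace.go old new n t (c :: acc) := rfl
      rw [e]
      have h1 : 0 < old.length := List.length_pos_iff.mpr hold
      by_cases hp : old.isPrefixOf (c :: t) = true
      · rw [if_pos hp]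
        rw [ih _ _ (by simp at h ⊢; omega)]
        rw [repC]
        rw [if_pos hp]
        have hd : List.drop old.length (c :: t) = List.drop (old.length - 1) t := by
          cases old with
          | nil => exact absurd rfl hold
          | cons o os => simp
        rw [hd]
        simp
      · rw [if_neg hp]
        rw [ih _ _ (by simp at h ⊢; omega)]
        rw [repC]
        rw [if_neg hp]
        simp

theorem replace_eq_repC (old new l : List Char) (hold : old ≠ []) :
    PySem.Chars.replace l old new = repC old new l := by
  unfold PySem.Chars.replace
  rw [if_neg (by simp [hold])]
  simpa using go_eq_repC old new hold l.length l [] le_rfl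

theorem repU_len_le (l : List Char) : (repC ['_','_'] ['_'] l).length ≤ l.length := by
  induction l using repC.induct ['_','_'] with
  | case1 => simp [repC]
  | case2 c t hp ih =>
    rw [repC, if_pos hp]
    have ht : t ≠ [] := by
      cases t with
      | nil => simp [List.isPrefixOf] at hp
      | cons _ _ => simp
    simp at ih ⊢
    cases t <;> simp_all <;> omega
  | case3 c t hp ih =>
    rw [repC, if_neg hp]
    simp at ih ⊢
    omega

theorem repU_len_lt (l : List Char) (h : ['_','_'] <:+: l) :
    (repC ['_','_'] ['_'] l).length < l.length := by
  induction l using repC.induct ['_','_'] with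
  | case1 => simp at h
  | case2 c t hp ih =>
    rw [repC, if_pos hp]
    cases t with
    | nil => simp [List.isPrefixOf] at hp
    | cons d t' =>
      have := repU_len_le (List.drop 1 (d :: t'))
      simp at this ⊢
      omega
  | case3 c t hp ih =>
    rw [repC, if_neg hp]
    have hinf : ['_','_'] <:+: t := by
      obtain ⟨u, v, hsu⟩ := h
      cases u with
      | nil =>
        exfalso; apply hp
        simp at hsu
        simp [List.isPrefixOf_iff_prefix]
        exact ⟨hsu.1, v, by simp [← hsu.2]⟩
      | cons a s' =>
        exact ⟨s', v, by simpa using congrArg List.tail hsu⟩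
    have := ih hinf
    simp at this ⊢
    omega

def collapseChars (l : List Char) : List Char :=
  if h : PySem.Chars.isIn ['_','_'] l = true then
    collapseChars (PySem.Chars.replace l ['_','_'] ['_'])
  else l
termination_by l.length
decreasing_by
  rw [replace_eq_repC _ _ _ (by simp)]
  exact repU_len_lt l ((PySem.Chars.isIn_iff_infix _ _).mp h)

def normalize_field_key_py (field_name : String) : String :=
  let n0 := PySem.Chars.lower field_name.toList
  let n1 := PySem.Chars.replace n0 [' ', '/', ' '] ['_']
  let n2 := PySem.Chars.replace n1 ['/'] ['_']
  let n3 := PySem.Chars.replace n2 [' '] ['_']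
  let n4 := collapseChars n3
  String.mk (PySem.Chars.stripChars n4 ['_'])

-- ===== PORT B =====
def sepB (c : Char) : Bool := c == ' ' || c == '/' || c == '_'

def bStep (st : List (List Char) × List Char) (c : Char) : List (List Char) × List Char :=
  if sepB c then (if st.2.isEmpty then st else (st.1 ++ [st.2], [])) else (st.1, st.2 ++ [c])

def normalize_field_key_py_alt (field_name : String) : String :=
  let st := (PySem.Chars.lower field_name.toList).foldl bStep ([], [])
  let toks := if st.2.isEmpty then st.1 else st.1 ++ [st.2]
  String.mk (PySem.Chars.join ['_'] toks)


-- ===== PRECONDITION & SPEC =====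
def Spec_normalize_field_key_py (field_name : String) (out : String) : Prop := out = normalize_field_key_py_alt field_name
instance (field_name : String) (out : String) : Decidable (Spec_normalize_field_key_py field_name out) := by unfold Spec_normalize_field_key_py; infer_instance

-- ===== CLAIM (what is proved, stated in full; the proofs are below) =====
def Claim_equal_normalize_field_key_py : Prop := ∀ (field_name : String), Dom_normalize_field_key_py field_name → Spec_normalize_field_key_py field_name (normalize_field_key_py field_name)

-- ===== LEMMAS AND PROOFS =====
def auxT (cur : List Char) : List Char → List (List Char)
  | [] => if cur.isEmpty then [] else [cur]
  | c :: t => if sepB c then (if cur.isEmpty then [] else [cur]) ++ auxT [] t else auxT (cur ++ [c]) t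

theorem bFold (l : List Char) : ∀ toks cur,
    (let st := l.foldl bStep (toks, cur);
     if st.2.isEmpty then st.1 else st.1 ++ [st.2]) = toks ++ auxT cur l := by
  induction l with
  | nil =>
    intro toks cur
    simp only [List.foldl_nil, auxT]
    by_cases hc : cur.isEmpty <;> simp [hc]
  | cons c t ih =>
    intro toks cur
    simp only [List.foldl_cons, auxT, bStep]
    by_cases hs : sepB c
    · by_cases hc : cur.isEmpty
      · simp only [hs, hc, if_true]
        have := ih toks cur
        have hcur : cur = [] := by simpa [List.isEmpty_iff] using hc
        subst hcur
        simpa using ih toks []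
      · simp only [hs, hc, if_true, if_false, Bool.false_eq_true]
        simpa using ih (toks ++ [cur]) []
    · simp only [hs, if_false, Bool.false_eq_true]
      simpa using ih toks (cur ++ [c])

theorem auxT_ne_nil (l : List Char) : ∀ cur, cur ≠ [] → auxT cur l ≠ [] := by
  induction l with
  | nil => intro cur h; simp [auxT, List.isEmpty_iff, h]
  | cons c t ih =>
    intro cur h
    rw [auxT]
    by_cases hs : sepB c
    · simp [hs, List.isEmpty_iff, h]
    · simp only [hs, if_false, Bool.false_eq_true]
      exact ih (cur ++ [c]) (by simp)

theorem auxT_run (w : List Char) (hw : ∀ c ∈ w, ¬ sepB c) :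
    ∀ cur X, auxT cur (w ++ X) = auxT (cur ++ w) X := by
  induction w with
  | nil => simp
  | cons a w' ih =>
    intro cur X
    have ha : ¬ sepB a = true := hw a (by simp)
    rw [List.cons_append, auxT, if_neg ha]
    rw [ih (fun c hc => hw c (by simp [hc])) (cur ++ [a]) X]
    simp

theorem auxT_seps (ns : List Char) (h1 : ns ≠ []) (h2 : ∀ c ∈ ns, sepB c) :
    ∀ cur X, auxT cur (ns ++ X) = (if cur.isEmpty then [] else [cur]) ++ auxT [] X := by
  induction ns with
  | nil => exact absurd rfl h1
  | cons a ns' ih =>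
    intro cur X
    have ha : sepB a = true := h2 a (by simp)
    rw [List.cons_append, auxT, if_pos ha]
    cases ns' with
    | nil => simp
    | cons b ns'' =>
      rw [ih (by simp) (fun c hc => h2 c (by simp [hc])) [] X]
      simp

theorem auxT_repC (old new : List Char) (ho : old ≠ []) (hos : ∀ c ∈ old, sepB c)
    (hn : new ≠ []) (hns : ∀ c ∈ new, sepB c) :
    ∀ l, (∀ cur, auxT cur (repC old new l) = auxT cur l) := by
  intro l
  induction l using repC.induct old with
  | case1 => intro cur; simp [repC]
  | case2 c t hp ih =>
    intro cur
    rw [repC, if_pos hp]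
    have hct : c :: t = old ++ List.drop (old.length - 1) t := by
      have h' := (List.isPrefixOf_iff_prefix.mp hp)
      obtain ⟨u, hu⟩ := h'
      have : u = List.drop old.length (c :: t) := by
        rw [← hu]; simp
      rw [← hu, this]
      cases old with
      | nil => exact absurd rfl ho
      | cons o os => simp
    rw [auxT_seps new hn hns cur _]
    conv_rhs => rw [hct]
    rw [auxT_seps old ho hos cur _]
    rw [ih []]
  | case3 c t hp ih =>
    intro cur
    rw [repC, if_neg hp]
    by_cases hs : sepB c
    · rw [auxT, if_pos hs, auxT, if_pos hs, ih []]
    · rw [auxT, if_neg hs, auxT, if_neg hs, ih (cur ++ [c])]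

theorem mem_repC (old new : List Char) : ∀ l c, c ∈ repC old new l → c ∈ new ∨ c ∈ l := by
  intro l
  induction l using repC.induct old with
  | case1 => intro c h; simp [repC] at h
  | case2 a t hp ih =>
    intro c h
    rw [repC, if_pos hp] at h
    rcases List.mem_append.mp h with h' | h'
    · exact Or.inl h'
    · rcases ih c h' with h'' | h''
      · exact Or.inl h''
      · exact Or.inr (by simp [List.mem_of_mem_drop h''])
  | case3 a t hp ih =>
    intro c h
    rw [repC, if_neg hp] at h
    rcases List.mem_cons.mp h with h' | h'
    · exact Or.inr (by simp [h'])
    · rcases ih c h' with h'' | h''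
      · exact Or.inl h''
      · exact Or.inr (by simp [h''])

theorem not_mem_repC_single (o : Char) (new : List Char) (ho : o ∉ new) :
    ∀ l, o ∉ repC [o] new l := by
  intro l
  induction l using repC.induct [o] with
  | case1 => simp [repC]
  | case2 a t hp ih =>
    rw [repC, if_pos hp]
    simp only [List.mem_append]
    rintro (h | h)
    · exact ho h
    · exact ih (by simpa using h)
  | case3 a t hp ih =>
    rw [repC, if_neg hp]
    simp only [List.mem_cons]
    rintro (h | h)
    · apply hp
      simp [List.isPrefixOf_iff_prefix, ← h]
    · exact ih h

theorem auxT_collapse (l : List Char) : auxT [] (collapseChars l) = auxT [] l := by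
  induction l using collapseChars.induct with
  | case1 l h ih =>
    rw [collapseChars, dif_pos h, ih,
      replace_eq_repC _ _ _ (by simp),
      auxT_repC ['_','_'] ['_'] (by simp) (by simp [sepB]) (by simp) (by simp [sepB]) l []]
  | case2 l h => rw [collapseChars, dif_neg h]

def sepOnlyU (m : List Char) : Prop := ∀ c ∈ m, sepB c → c = '_'

theorem sepOnlyU_collapse (l : List Char) (h : sepOnlyU l) : sepOnlyU (collapseChars l) := by
  induction l using collapseChars.induct with
  | case1 l hin ih =>
    rw [collapseChars, dif_pos hin]
    apply ih
    intro c hc hs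
    rw [replace_eq_repC _ _ _ (by simp)] at hc
    rcases mem_repC _ _ _ _ hc with h' | h'
    · simpa using h'
    · exact h c h' hs
  | case2 l hin => rw [collapseChars, dif_neg hin]; exact h

theorem collapse_no_doubles (l : List Char) : ¬ ['_','_'] <:+: collapseChars l := by
  induction l using collapseChars.induct with
  | case1 l hin ih => rw [collapseChars, dif_pos hin]; exact ih
  | case2 l hin =>
    rw [collapseChars, dif_neg hin]
    exact (PySem.Chars.isIn_eq_false_iff _ _).mp (by simpa using hin)

def rstripU (m : List Char) : List Char :=
  (List.dropWhile (fun c => (['_'] : List Char).contains c) m.reverse).reverse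

theorem rstripU_all_nonU (m : List Char) (h : ∀ c ∈ m, c ≠ '_') : rstripU m = m := by
  unfold rstripU
  have h2 : List.dropWhile (fun c => (['_'] : List Char).contains c) m.reverse = m.reverse := by
    apply List.dropWhile_eq_self_iff.mpr
    intro hh
    have hm : m.reverse[0] ∈ m := by
      have := List.getElem_mem hh
      simpa using this
    simpa using h _ hm
  rw [h2]
  simp

theorem rstripU_append_single (w : List Char) (h : ∀ c ∈ w, c ≠ '_') :
    rstripU (w ++ ['_']) = w := by
  unfold rstripU
  rw [List.reverse_append, show (['_'] : List Char).reverse = ['_'] from rfl,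
    List.singleton_append, List.dropWhile_cons, if_pos (by simp)]
  have h1 := rstripU_all_nonU w h
  unfold rstripU at h1
  have h2 : (List.dropWhile (fun c => (['_'] : List Char).contains c) w.reverse) = w.reverse := by
    have := congrArg List.reverse h1
    simpa using this
  rw [h2]
  simp

theorem rstripU_append_of_ne_nil (x y : List Char) (h : rstripU y ≠ []) :
    rstripU (x ++ y) = x ++ rstripU y := by
  unfold rstripU at h ⊢
  rw [List.reverse_append, List.dropWhile_append]
  have hne' : List.dropWhile (fun c => (['_'] : List Char).contains c) y.reverse ≠ [] := by
    intro hc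
    exact h (by rw [hc]; rfl)
  rw [if_neg (by simpa [List.isEmpty_iff] using hne')]
  simp

theorem rstripU_ne_nil_of_head (d : Char) (t : List Char) (hd : d ≠ '_') :
    rstripU (d :: t) ≠ [] := by
  unfold rstripU
  intro h
  have h2 : List.dropWhile (fun c => (['_'] : List Char).contains c) (d :: t).reverse = [] := by
    have := congrArg List.reverse h
    simpa using this
  rw [List.dropWhile_eq_nil_iff] at h2
  have hm : d ∈ (d :: t).reverse := by simp
  have := h2 d hm
  simp at this
  exact hd this

theorem head_dropWhile_not (p : Char → Bool) (l : List Char) :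
    ∀ d t, List.dropWhile p l = d :: t → ¬ p d = true := by
  induction l with
  | nil => intro d t h; simp at h
  | cons a l' ih =>
    intro d t h
    rw [List.dropWhile_cons] at h
    by_cases hp : p a
    · rw [if_pos hp] at h; exact ih d t h
    · rw [if_neg hp] at h
      cases h
      exact hp

theorem rstripU_spec : ∀ n m, m.length ≤ n → sepOnlyU m → ¬ ['_','_'] <:+: m →
    (∀ d t', m = d :: t' → d ≠ '_') →
    rstripU m = PySem.Chars.join ['_'] (auxT [] m) := by
  intro n
  induction n with
  | zero =>
    intro m hlen _ _ _
    have : m = [] := by cases m <;> simp_all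
    subst this
    rfl
  | succ n ih =>
    intro m hlen h1 h2 h3
    cases hm : m with
    | nil => rfl
    | cons c t =>
      subst hm
      have hc : ¬ sepB c = true := by
        intro hs
        exact h3 c t rfl (h1 c (by simp) hs)
      have hdecomp := List.takeWhile_append_dropWhile (p := fun c => !sepB c) (l := c :: t)
      set w := List.takeWhile (fun c => !sepB c) (c :: t) with hw
      set r := List.dropWhile (fun c => !sepB c) (c :: t) with hr
      have hwne : w = c :: List.takeWhile (fun c => !sepB c) t := by
        rw [hw, List.takeWhile_cons, if_pos (by simp [hc])]
      have hwnon : ∀ a ∈ w, ¬ sepB a = true := by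
        intro a ha
        have := List.mem_takeWhile_imp ha
        simpa using this
      have hwnonU : ∀ a ∈ w, a ≠ '_' := by
        intro a ha heq
        exact hwnon a ha (by simp [heq, sepB])
      have hwemp : w.isEmpty = false := by rw [hwne]; simp
      have haux : auxT [] (c :: t) = auxT w r := by
        conv_lhs => rw [← hdecomp]
        rw [auxT_run w hwnon [] r]
        simp
      rw [haux]
      cases hrc : r with
      | nil =>
        have hmw : c :: t = w := by rw [← hdecomp, hrc]; simp
        conv_lhs => rw [hmw]
        rw [auxT, if_neg (by simp [hwemp])]
        rw [PySem.Chars.join_singleton]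
        exact rstripU_all_nonU w hwnonU
      | cons d r' =>
        have hd : sepB d = true := by
          have := head_dropWhile_not (fun c => !sepB c) (c :: t) d r' (by rw [← hr, hrc])
          simpa using this
        have hdm : d ∈ c :: t := by
          rw [← hdecomp, hrc]; simp
        have hdu : d = '_' := h1 d hdm hd
        subst hdu
        rw [auxT, if_pos (by simp [sepB]), if_neg (by simp [hwemp])]
        cases hr'c : r' with
        | nil =>
          have hmw : c :: t = w ++ ['_'] := by rw [← hdecomp, hrc, hr'c]
          conv_lhs => rw [hmw]
          rw [rstripU_append_single w hwnonU]
          simp [auxT, PySem.Chars.join_singleton]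
        | cons e r'' =>
          have hem : e ∈ c :: t := by
            rw [← hdecomp, hrc, hr'c]; simp
          have he : e ≠ '_' := by
            intro heq
            apply h2
            have hin : ['_','_'] <:+: r := by
              rw [hrc, hr'c, heq]
              exact ⟨[], r'', by simp⟩
            have hsuf : r <:+ c :: t := by
              rw [hr]; exact List.dropWhile_suffix _
            exact hin.trans hsuf.isInfix
          have hes : ¬ sepB e = true := fun hs => he (h1 e hem hs)
          have hmw : c :: t = (w ++ ['_']) ++ r' := by
            rw [← hdecomp, hrc, hr'c]; simp
          have hsufr' : r' <:+ c :: t := by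
            have h5 : r' <:+ r := by rw [hrc]; exact List.suffix_cons _ _
            have h6 : r <:+ c :: t := by rw [hr]; exact List.dropWhile_suffix _
            exact h5.trans h6
          have hsub1 : sepOnlyU r' := fun a ha hs => h1 a (hsufr'.subset ha) hs
          have hsub2 : ¬ ['_','_'] <:+: r' := fun hinf => h2 (hinf.trans hsufr'.isInfix)
          have hsub3 : ∀ a t'', r' = a :: t'' → a ≠ '_' := by
            intro a t'' heq
            rw [hr'c] at heq
            cases heq
            exact he
          have hwlen : 1 ≤ w.length := by rw [hwne]; simp
          have hlen' : r'.length ≤ n := by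
            have h7 := congrArg List.length hmw
            simp at h7 hlen
            omega
          have hihr := ih r' hlen' hsub1 hsub2 hsub3
          have hrne : rstripU r' ≠ [] := by
            rw [hr'c]; exact rstripU_ne_nil_of_head e r'' he
          have hlhs : rstripU (c :: t) = (w ++ ['_']) ++ rstripU r' := by
            rw [hmw]; exact rstripU_append_of_ne_nil _ _ hrne
          have hauxne : auxT [] r' ≠ [] := by
            rw [hr'c, auxT, if_neg hes]
            exact auxT_ne_nil r'' [e] (by simp)
          obtain ⟨a, rest, har⟩ := List.exists_cons_of_ne_nil hauxne
          rw [hlhs, hihr, ← hr'c, har]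
          rw [List.singleton_append, PySem.Chars.join_cons_cons]

theorem stripChars_eq_rstripU (m : List Char) :
    PySem.Chars.stripChars m ['_'] =
      rstripU (List.dropWhile (fun c => (['_'] : List Char).contains c) m) := rfl

theorem stripNF (m : List Char) (h1 : sepOnlyU m) (h2 : ¬ ['_','_'] <:+: m) :
    PySem.Chars.stripChars m ['_'] = PySem.Chars.join ['_'] (auxT [] m) := by
  rw [stripChars_eq_rstripU]
  cases m with
  | nil => rfl
  | cons c t =>
    by_cases hcU : c = '_'
    · subst hcU
      have ht : ∀ d t', t = d :: t' → d ≠ '_' := by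
        intro d t' heq hdu
        subst heq hdu
        exact h2 ⟨[], t', by simp⟩
      have hdw : List.dropWhile (fun c => (['_'] : List Char).contains c) ('_' :: t) =
          List.dropWhile (fun c => (['_'] : List Char).contains c) t := by
        rw [List.dropWhile_cons, if_pos (by simp)]
      have hdwt : List.dropWhile (fun c => (['_'] : List Char).contains c) t = t := by
        cases htc : t with
        | nil => simp
        | cons d t' =>
          rw [List.dropWhile_cons, if_neg (by simpa using ht d t' htc)]
      rw [hdw, hdwt]
      have hstep : auxT [] ('_' :: t) = auxT [] t := by
        rw [auxT, if_pos (by simp [sepB])]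
        simp
      rw [hstep]
      have h1' : sepOnlyU t := fun a ha hs => h1 a (by simp [ha]) hs
      have h2' : ¬ ['_','_'] <:+: t := fun hinf => h2 (hinf.trans (List.suffix_cons _ _).isInfix)
      exact rstripU_spec t.length t le_rfl h1' h2' ht
    · have hdwm : List.dropWhile (fun c => (['_'] : List Char).contains c) (c :: t) = c :: t := by
        rw [List.dropWhile_cons, if_neg (by simpa using hcU)]
      rw [hdwm]
      exact rstripU_spec (c :: t).length (c :: t) le_rfl h1 h2
        (by intro d t' heq; cases heq; exact hcU)

theorem strip_collapse (m : List Char) (h : sepOnlyU m) :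
    PySem.Chars.stripChars (collapseChars m) ['_'] = PySem.Chars.join ['_'] (auxT [] m) := by
  rw [← auxT_collapse m]
  exact stripNF (collapseChars m) (sepOnlyU_collapse m h) (collapse_no_doubles m)

theorem s3_sepOnlyU (l : List Char) :
    sepOnlyU (PySem.Chars.replace (PySem.Chars.replace (PySem.Chars.replace l [' ', '/', ' '] ['_']) ['/'] ['_']) [' '] ['_']) := by
  intro c hc hs
  rw [replace_eq_repC _ _ _ (by simp)] at hc
  have hcase : c = ' ' ∨ c = '/' ∨ c = '_' := by
    simpa [sepB, or_assoc] using hs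
  rcases hcase with h' | h' | h'
  · subst h'
    exact absurd hc (not_mem_repC_single ' ' ['_'] (by simp) _)
  · subst h'
    rcases mem_repC _ _ _ _ hc with h'' | h''
    · simp at h''
    · rw [replace_eq_repC _ _ _ (by simp)] at h''
      exact absurd h'' (not_mem_repC_single '/' ['_'] (by simp) _)
  · exact h'

-- ===== VERDICT (by name: the statement is the Claim_ definition above) =====
theorem normalize_field_key_py_spec : Claim_equal_normalize_field_key_py := by
  intro field_name _
  unfold Spec_normalize_field_key_py normalize_field_key_py normalize_field_key_py_alt
  apply congrArg String.mk
  rw [strip_collapse _ (s3_sepOnlyU (PySem.Chars.lower field_name.toList))]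
  rw [bFold (PySem.Chars.lower field_name.toList) [] []]
  apply congrArg (PySem.Chars.join ['_'])
  rw [replace_eq_repC _ _ _ (by simp), replace_eq_repC _ _ _ (by simp),
    replace_eq_repC _ _ _ (by simp)]
  rw [auxT_repC [' '] ['_'] (by simp) (by intro c hc; fin_cases hc <;> rfl) (by simp) (by intro c hc; fin_cases hc <;> rfl) _ [],
    auxT_repC ['/'] ['_'] (by simp) (by intro c hc; fin_cases hc <;> rfl) (by simp) (by intro c hc; fin_cases hc <;> rfl) _ [],
    auxT_repC [' ', '/', ' '] ['_'] (by simp) (by intro c hc; fin_cases hc <;> rfl) (by simp) (by intro c hc; fin_cases hc <;> rfl) _ []]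
  simp
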